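-- pv_equiv track=rewrite | github.com/laurentsenta/baconql | compiler/loader.py | tokenize_lines
-- ===== SOURCE A (Python) =====
-- from collections import namedtuple
--
-- Line = namedtuple('Line', ['line_number', 'content'])
--
-- Block = namedtuple('Block', ['file_path', 'lines'])
--
-- def tokenize_lines(file_path, lines):
--     blocks = []
--     current_lines = []
--     previous_empty = True
--
--     for i, l in enumerate(lines):
--         if len(l) == 0:
--             previous_empty = True
--             continue
--
--         if l.startswith('--') and previous_empty:
--             blocks.append(Block(file_path=file_path, lines=current_lines))
--             current_lines = []
--
--         current_lines.append(Line(line_number=i + 1, content=l))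
--         previous_empty = False
--
--     blocks.append(Block(file_path=file_path, lines=current_lines))
--
--     return blocks[1:]
-- ===== SOURCE B (Python) =====
-- from collections import namedtuple
--
-- Line = namedtuple('Line', ['line_number', 'content'])
--
-- Block = namedtuple('Block', ['file_path', 'lines'])
--
-- def tokenize_lines(file_path, lines):
--     # Pass 1: keep the non-empty lines, flagging block boundaries with a
--     # stateless local test: a line opens a block iff it starts with '--'
--     # and the previous raw line is empty (or it is the first line).
--     flagged = [(Line(i + 1, l), l.startswith('--') and (i == 0 or lines[i - 1] == ''))
--                for i, l in enumerate(lines) if l]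
--     # Pass 2: open a new block at each boundary; lines before the first
--     # boundary have no open block and are discarded.
--     blocks = []
--     for ln, is_start in flagged:
--         if is_start:
--             blocks.append(Block(file_path, [ln]))
--         elif blocks:
--             blocks[-1].lines.append(ln)
--     return blocks
-- ===== Notes on version B (the rewrite author's own statement) =====
-- stated objective: alternative
-- what changed: B replaces A's previous_empty state machine with sentinel block dropped by blocks[1:] by a stateless local boundary test (line starts with '--' and the previous raw line is empty or it is first), a flag-then-group decomposition: one comprehension producing flagged non-empty lines, then a grouping pass that opens a block at each flag and discards lines before the first boundary because no block is open.
import Mathlib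
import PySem

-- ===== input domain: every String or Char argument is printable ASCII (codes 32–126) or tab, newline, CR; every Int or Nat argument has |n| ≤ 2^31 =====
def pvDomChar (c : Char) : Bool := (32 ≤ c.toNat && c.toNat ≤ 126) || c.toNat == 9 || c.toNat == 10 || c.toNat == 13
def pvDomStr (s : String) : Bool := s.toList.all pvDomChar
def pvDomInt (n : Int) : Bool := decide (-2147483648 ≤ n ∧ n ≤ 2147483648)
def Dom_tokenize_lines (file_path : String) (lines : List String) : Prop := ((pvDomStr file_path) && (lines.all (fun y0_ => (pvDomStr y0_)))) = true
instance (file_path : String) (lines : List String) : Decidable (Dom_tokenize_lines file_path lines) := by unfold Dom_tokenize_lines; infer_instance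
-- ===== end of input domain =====

-- B: stateless local boundary test (previous raw line empty) + flag-then-group pass,
-- replacing A's previous_empty state machine with a sentinel block dropped by blocks[1:]. (alternative)


-- ===== PORT A =====
-- the for-loop of A: state (blocks, current_lines, previous_empty), index i
def aLoop (file_path : String) :
    Nat → List (String × List (Int × String)) → List (Int × String) → Bool →
    List String → List (String × List (Int × String)) × List (Int × String)
  | _, blocks, current_lines, _, [] => (blocks, current_lines)
  | i, blocks, current_lines, previous_empty, l :: rest =>
    if PySem.Str.len l = 0 then
      aLoop file_path (i + 1) blocks current_lines true rest
    else
      let st :=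
        if PySem.Str.startswith l "--" && previous_empty then
          (blocks ++ [(file_path, current_lines)], ([] : List (Int × String)))
        else (blocks, current_lines)
      aLoop file_path (i + 1) st.1 (st.2 ++ [((i : Int) + 1, l)]) false rest

def tokenize_lines (file_path : String) (lines : List String) : List (String × (List (Int × String))) :=
  let st := aLoop file_path 0 [] [] true lines
  ((st.1 ++ [(file_path, st.2)]).drop 1)

-- ===== PORT B =====
-- pass 1 of B (the comprehension): non-empty lines, each with its boundary flag
def bFlagged (lines : List String) : Nat → List String → List ((Int × String) × Bool)
  | _, [] => []
  | i, l :: rest =>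
    if l ≠ "" then
      (((i : Int) + 1, l),
        PySem.Str.startswith l "--" &&
          (decide (i = 0) || decide (PySem.List.pyGet? lines ((i : Int) - 1) = some "")))
        :: bFlagged lines (i + 1) rest
    else bFlagged lines (i + 1) rest

-- pass 2 of B: open a block at each flag, else append to the last open block
def bGroup (file_path : String) :
    List (String × List (Int × String)) → List ((Int × String) × Bool) →
    List (String × List (Int × String))
  | blocks, [] => blocks
  | blocks, (ln, isStart) :: rest =>
    if isStart then bGroup file_path (blocks ++ [(file_path, [ln])]) rest
    else if blocks ≠ [] then
      bGroup file_path
        (blocks.dropLast ++ [((blocks.getLastD (file_path, [])).1, (blocks.getLastD (file_path, [])).2 ++ [ln])])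
        rest
    else bGroup file_path blocks rest

def tokenize_lines_alt (file_path : String) (lines : List String) : List (String × (List (Int × String))) :=
  bGroup file_path [] (bFlagged lines 0 lines)

-- ===== PRECONDITION & SPEC =====
def Spec_tokenize_lines (file_path : String) (lines : List String) (out : List (String × (List (Int × String)))) : Prop := out = tokenize_lines_alt file_path lines
instance (file_path : String) (lines : List String) (out : List (String × (List (Int × String)))) : Decidable (Spec_tokenize_lines file_path lines out) := by unfold Spec_tokenize_lines; infer_instance

-- ===== CLAIM (what is proved, stated in full; the proofs are below) =====
def Claim_equal_tokenize_lines : Prop := ∀ (file_path : String) (lines : List String), Dom_tokenize_lines file_path lines → Spec_tokenize_lines file_path lines (tokenize_lines file_path lines)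

-- ===== LEMMAS AND PROOFS =====

lemma drop1_append {α : Type} (xs ys : List α) (h : xs ≠ []) :
    (xs ++ ys).drop 1 = xs.drop 1 ++ ys := by
  cases xs with
  | nil => exact absurd rfl h
  | cons a t => simp

lemma strlen_zero_iff (l : String) : PySem.Str.len l = 0 ↔ l = "" := by
  simp [PySem.Str.len_eq, String.length_eq_zero_iff]

-- the invariant: running the tail of A's loop from state (blocks, cur, pe) and
-- finishing (append sentinel, drop one) equals B's grouping of the flagged tail
-- started from the blocks A would have delivered so far.
lemma key (fp : String) (lines : List String) :
    ∀ (rest : List String) (i : Nat) (blocks : List (String × List (Int × String)))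
      (cur : List (Int × String)) (pe : Bool),
      rest = lines.drop i →
      pe = (decide (i = 0) || decide (PySem.List.pyGet? lines ((i : Int) - 1) = some "")) →
      ((aLoop fp i blocks cur pe rest).1 ++ [(fp, (aLoop fp i blocks cur pe rest).2)]).drop 1
        = bGroup fp ((blocks ++ [(fp, cur)]).drop 1) (bFlagged lines i rest) := by
  intro rest
  induction rest with
  | nil => intro i blocks cur pe _ _; simp [aLoop, bFlagged, bGroup]
  | cons l rest' ih =>
    intro i blocks cur pe hdrop hpe
    have hget : lines[i]? = some l := by
      have h := congrArg (fun t => t[0]?) hdrop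
      simp only [List.getElem?_drop] at h
      simpa using h.symm
    have hdrop' : rest' = lines.drop (i + 1) := by
      have h : lines.drop (i + 1) = (lines.drop i).drop 1 := by rw [List.drop_drop]
      rw [h, ← hdrop]; simp
    have hcast : ((i + 1 : Nat) : Int) - 1 = ((i : Nat) : Int) := by push_cast; ring
    by_cases hl : l = ""
    · -- empty line: A sets previous_empty := True, B's comprehension skips it
      subst hl
      rw [aLoop, if_pos (by decide), bFlagged, if_neg (by simp)]
      exact ih (i + 1) blocks cur true hdrop'
        (by rw [hcast]; simp [PySem.List.pyGet?_natCast, hget])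
    · have hlen : ¬ PySem.Str.len l = 0 := fun h => hl ((strlen_zero_iff l).mp h)
      have hpe' : (false : Bool) =
          (decide (i + 1 = 0) || decide (PySem.List.pyGet? lines (((i + 1 : Nat) : Int) - 1) = some "")) := by
        rw [hcast]; simp [PySem.List.pyGet?_natCast, hget, hl]
      have hflag : (PySem.Str.startswith l "--" &&
          (decide (i = 0) || decide (PySem.List.pyGet? lines ((i : Int) - 1) = some ""))) =
          (PySem.Str.startswith l "--" && pe) := by rw [hpe]
      rw [aLoop, if_neg hlen, bFlagged, if_pos hl, hflag]
      by_cases hb : (PySem.Str.startswith l "--" && pe) = true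
      · -- boundary: A flushes cur into blocks, B opens a fresh block
        rw [if_pos hb, bGroup, if_pos hb]
        simp only [List.nil_append]
        rw [ih (i + 1) (blocks ++ [(fp, cur)]) [((i : Int) + 1, l)] false hdrop' hpe']
        rw [drop1_append (blocks ++ [(fp, cur)]) [(fp, [((i : Int) + 1, l)])] (by simp)]
      · -- ordinary line: A extends cur, B appends to the last open block (if any)
        rw [if_neg hb, bGroup, if_neg hb]
        rw [ih (i + 1) blocks (cur ++ [((i : Int) + 1, l)]) false hdrop' hpe']
        cases blocks with
        | nil => simp
        | cons b bs =>
          have hne : (bs ++ [(fp, cur)]) ≠ [] := by simp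
          simp only [List.cons_append, List.drop_succ_cons, List.drop_zero]
          rw [if_pos hne]
          rw [List.dropLast_concat, List.getLastD_concat]

-- ===== VERDICT (by name: the statement is the Claim_ definition above) =====
theorem tokenize_lines_spec : Claim_equal_tokenize_lines := by
  intro fp lines _
  unfold Spec_tokenize_lines tokenize_lines tokenize_lines_alt
  have := key fp lines lines 0 [] [] true (by simp) (by simp)
  simpa using this
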